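-- pv_equiv track=rewrite | github.com/ssangervasi/python-playground | riddle/google_practice/solutions.py | pancake_flipper
-- ===== SOURCE A (Python) =====
-- def pancake_flipper(stack):
-- 	if len(stack) < 1:
-- 		return 0
-- 	flips = 0
-- 	current = stack[0]
-- 	for pancake in stack[1:]:
-- 		if pancake != current:
-- 			flips += 1
-- 			current = pancake
-- 	if current == '-':
-- 		flips += 1
-- 	return flips
-- ===== SOURCE B (Python) =====
-- def _runs(s):
--     """Number of maximal runs of equal characters in s: repeatedly strip
--     the whole leading run (lstrip with the first character)."""
--     count = 0
--     while s:
--         s = s.lstrip(s[0])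
--         count += 1
--     return count
--
-- def pancake_flipper(stack):
--     if not stack:
--         return 0
--     # each run boundary needs one flip; one extra flip if the last run is '-'
--     return _runs(stack) - 1 + stack.endswith('-')
-- ===== Notes on version B (the rewrite author's own statement) =====
-- stated objective: alternative
-- what changed: Replaces the single-pass accumulator loop that tracks the latest character by a run decomposition: a loop that repeatedly strips the whole leading run with lstrip to count maximal runs, then returns the run count minus one plus a final-run adjustment via endswith.
import Mathlib
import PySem

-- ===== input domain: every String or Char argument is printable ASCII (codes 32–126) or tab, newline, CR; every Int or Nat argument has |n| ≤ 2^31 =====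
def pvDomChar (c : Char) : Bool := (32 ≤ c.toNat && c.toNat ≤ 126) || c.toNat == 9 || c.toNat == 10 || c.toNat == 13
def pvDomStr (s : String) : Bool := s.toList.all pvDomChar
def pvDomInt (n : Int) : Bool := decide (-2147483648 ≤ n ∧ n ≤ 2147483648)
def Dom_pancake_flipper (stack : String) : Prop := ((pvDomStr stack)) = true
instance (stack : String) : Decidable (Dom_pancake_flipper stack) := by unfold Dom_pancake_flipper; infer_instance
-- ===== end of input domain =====

-- B replaces A's accumulator loop tracking the latest character by an iterative
-- run decomposition: strip whole leading runs (lstrip), count maximal runs,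
-- return the run count minus one plus a final-run endswith adjustment.

-- ===== PORT A =====
def pancake_flipper (stack : String) : Int :=
  if stack.toList.length < 1 then 0
  else
    match stack.toList with
    | [] => 0
    | c :: rest =>
      let r := rest.foldl
        (fun (st : Int × Char) pancake =>
          if pancake ≠ st.2 then (st.1 + 1, pancake) else st) ((0 : Int), c)
      if r.2 = '-' then r.1 + 1 else r.1

-- ===== PORT B =====
-- _runs' while loop: s.lstrip(s[0]) drops the whole leading run of equal
-- characters (exact here: the argument is the single head character);
-- count is the loop accumulator.
def pv_runs (s : List Char) (count : Int) : Int :=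
  match s with
  | [] => count
  | c :: rest => pv_runs (rest.dropWhile (· == c)) (count + 1)
termination_by s.length
decreasing_by
  simp only [List.length_cons]
  have := List.length_dropWhile_le (· == c) rest
  omega

def pancake_flipper_alt (stack : String) : Int :=
  if stack.toList.length = 0 then 0
  else pv_runs stack.toList 0 - 1
    + (if PySem.Str.endswith stack "-" then 1 else 0)

-- ===== PRECONDITION & SPEC =====
def Spec_pancake_flipper (stack : String) (out : Int) : Prop := out = pancake_flipper_alt stack
instance (stack : String) (out : Int) : Decidable (Spec_pancake_flipper stack out) := by unfold Spec_pancake_flipper; infer_instance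

-- ===== CLAIM (what is proved, stated in full; the proofs are below) =====
def Claim_equal_pancake_flipper : Prop := ∀ (stack : String), Dom_pancake_flipper stack → Spec_pancake_flipper stack (pancake_flipper stack)

-- ===== LEMMAS AND PROOFS =====

lemma pv_runs_shift (n : Nat) : ∀ (s : List Char), s.length ≤ n →
    ∀ (k : Int), pv_runs s (k + 1) = pv_runs s k + 1 := by
  induction n with
  | zero =>
    intro s hs k
    have : s = [] := List.eq_nil_of_length_eq_zero (Nat.le_zero.mp hs)
    subst this; simp [pv_runs]
  | succ m ih =>
    intro s hs k
    cases s with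
    | nil => simp [pv_runs]
    | cons c rest =>
      rw [pv_runs, pv_runs]
      have hlen : (rest.dropWhile (· == c)).length ≤ m := by
        have := List.length_dropWhile_le (· == c) rest
        simp only [List.length_cons] at hs
        omega
      exact ih _ hlen (k + 1)

lemma pv_runs_cons (c : Char) (rest : List Char) :
    pv_runs (c :: rest) 0 = 1 + pv_runs (rest.dropWhile (· == c)) 0 := by
  rw [pv_runs]
  rw [show (0 : Int) + 1 = (0 : Int) + 1 from rfl]
  rw [pv_runs_shift (rest.dropWhile (· == c)).length _ le_rfl 0]
  ring

lemma pv_getLast? (rest : List Char) : ∀ (c : Char), (c :: rest).getLast? = some (rest.getLastD c) := by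
  induction rest with
  | nil => intro c; rfl
  | cons d t ih => intro c; rw [List.getLastD_cons, List.getLast?_cons_cons]; exact ih d

-- A's loop from state (f, c) yields (f + runs(c::rest) - 1, last char).
lemma pv_foldA (rest : List Char) : ∀ (c : Char) (f : Int),
    rest.foldl
      (fun (st : Int × Char) pancake =>
        if pancake ≠ st.2 then (st.1 + 1, pancake) else st) (f, c)
    = (f + pv_runs (c :: rest) 0 - 1, rest.getLastD c) := by
  induction rest with
  | nil => intro c f; simp [pv_runs_cons, pv_runs]
  | cons d t ih =>
    intro c f
    simp only [List.foldl_cons]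
    by_cases h : d = c
    · subst h
      rw [if_neg (by simp), ih d f]
      refine Prod.ext ?_ (by rw [List.getLastD_cons])
      have : pv_runs (d :: d :: t) 0 = pv_runs (d :: t) 0 := by
        rw [pv_runs_cons, pv_runs_cons (rest := t)]
        simp [List.dropWhile]
      simp [this]
    · rw [if_pos (by simpa using h), ih d (f + 1)]
      refine Prod.ext ?_ (by rw [List.getLastD_cons])
      have : pv_runs (c :: d :: t) 0 = 1 + pv_runs (d :: t) 0 := by
        rw [pv_runs_cons]
        have hd : (d :: t).dropWhile (· == c) = d :: t := by
          rw [List.dropWhile_cons, if_neg (by simp [h])]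
        simpa using congrArg (fun l => 1 + pv_runs l 0) hd
      simp only [this]
      ring_nf
  
lemma pv_last_suffix (c : Char) (rest : List Char) :
    (['-'] <:+ (c :: rest)) ↔ rest.getLastD c = '-' := by
  rw [← Option.some.injEq, ← pv_getLast? rest c, List.getLast?_eq_some_iff]
  constructor
  · rintro ⟨l, hl⟩; exact ⟨l, hl.symm⟩
  · rintro ⟨l, hl⟩; exact ⟨l, hl.symm⟩

-- ===== VERDICT (by name: the statement is the Claim_ definition above) =====
theorem pancake_flipper_spec : Claim_equal_pancake_flipper := by
  intro stack _
  unfold Spec_pancake_flipper pancake_flipper pancake_flipper_alt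
  cases hs : stack.toList with
  | nil => simp
  | cons c rest =>
    rw [if_neg (show ¬((c :: rest).length < 1) by simp),
        if_neg (show ¬((c :: rest).length = 0) by simp)]
    simp only
    rw [pv_foldA rest c 0]
    have hend : PySem.Str.endswith stack "-" = true ↔ rest.getLastD c = '-' := by
      rw [PySem.Str.endswith_eq]
      simp only [hs]
      rw [PySem.Chars.endswith_iff]
      exact pv_last_suffix c rest
    by_cases h : rest.getLastD c = '-'
    · rw [if_pos h, if_pos (hend.mpr h)]
      ring
    · rw [if_neg h, if_neg (fun hc => h (hend.mp hc))]
      ring
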